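-- pv_equiv track=rewrite | github.com/iamprahladk/aoc-2015 | day11/code.py | password_rule_three
-- ===== SOURCE A (Python) =====
-- def password_rule_three(string):
--     boolean = False
--     skip_loop = False
--     current_list = []
--     for index, letter in enumerate(string[:-1]):
--         if skip_loop:
--             skip_loop = False
--             continue
--         if letter == string[index+1]:
--             current_pair = f'{letter}{string[index + 1]}'
--             current_list.append(current_pair)
--             skip_loop = True
--     if len(current_list) == 2:
--         boolean = True
--     return boolean
-- ===== SOURCE B (Python) =====
-- def password_rule_three(string):
--     runs = []
--     for ch in string:
--         if runs and runs[-1][0] == ch: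
--             runs[-1][1] += 1
--         else:
--             runs.append([ch, 1])
--     return sum(n // 2 for _, n in runs) == 2
-- ===== Notes on version B (the rewrite author's own statement) =====
-- stated objective: alternative
-- what changed: Replaced the skip-flag pair scan by run-length encoding: B groups the string into maximal runs of equal characters and sums floor(run_length/2) over runs, which equals the greedy non-overlapping adjacent-pair count, then compares to 2.
import Mathlib
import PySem

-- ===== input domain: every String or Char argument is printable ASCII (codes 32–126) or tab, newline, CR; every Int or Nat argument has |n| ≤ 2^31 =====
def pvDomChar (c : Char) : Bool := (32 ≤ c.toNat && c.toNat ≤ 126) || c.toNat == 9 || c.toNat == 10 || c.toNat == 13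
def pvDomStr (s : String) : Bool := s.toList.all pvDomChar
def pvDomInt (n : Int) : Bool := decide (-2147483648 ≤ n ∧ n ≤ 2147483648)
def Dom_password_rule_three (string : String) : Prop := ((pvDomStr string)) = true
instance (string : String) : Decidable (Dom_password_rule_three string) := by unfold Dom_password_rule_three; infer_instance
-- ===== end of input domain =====

-- B replaces A's skip-flag pair scan (accumulated list of pair strings) by run-length
-- encoding plus summing floor(run/2) over the runs; objective: alternative, same cost.


-- ===== PORT A =====
def password_rule_three (string : String) : Bool :=
  let cs := string.toList
  -- state = (skip_loop, current_list); 'boolean' is only set after the loop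
  let fin :=
    (PySem.List.enumerate (PySem.List.slice cs none (some (-1))) 0).foldl
      (fun (st : Bool × List String) (p : Int × Char) =>
        if st.1 then (false, st.2)
        else
          match PySem.List.pyGet? cs (p.1 + 1) with
          | some nxt =>
              if p.2 == nxt then (true, st.2 ++ [String.ofList [p.2, nxt]]) else st
          | none => st    -- unreachable: p.1 + 1 < cs.length for every enumerated index
      ) (false, ([] : List String))
  decide (fin.2.length = 2)

-- ===== PORT B =====
-- the loop body of Source B: extend the last run if it matches ch, else start a new run
def pvStepRuns (runs : List (Char × Nat)) (ch : Char) : List (Char × Nat) :=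
  match runs.getLast? with
  | some (c, n) => if c == ch then runs.dropLast ++ [(c, n + 1)] else runs ++ [(ch, 1)]
  | none => runs ++ [(ch, 1)]

def password_rule_three_alt (string : String) : Bool :=
  let runs := string.toList.foldl pvStepRuns []
  decide ((runs.map (fun p => p.2 / 2)).sum = 2)

-- ===== PRECONDITION & SPEC =====
def Spec_password_rule_three (string : String) (out : Bool) : Prop := out = password_rule_three_alt string
instance (string : String) (out : Bool) : Decidable (Spec_password_rule_three string out) := by unfold Spec_password_rule_three; infer_instance

-- ===== CLAIM (what is proved, stated in full; the proofs are below) =====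
def Claim_equal_password_rule_three : Prop := ∀ (string : String), Dom_password_rule_three string → Spec_password_rule_three string (password_rule_three string)

-- ===== LEMMAS AND PROOFS =====

-- proof-side count of greedy non-overlapping adjacent pairs (structural form of A's loop)
def pairsCountB : List Char → Nat
  | [] => 0
  | [_] => 0
  | a :: b :: r => if a == b then 1 + pairsCountB r else pairsCountB (b :: r)

-- B's sum of floor halves over a run list
def sumHalves (runs : List (Char × Nat)) : Nat := (runs.map (fun p => p.2 / 2)).sum

-- proof-side recursion of B's fold: current open run (c, n), rest of the string
def pairsRun (c : Char) (n : Nat) : List Char → Nat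
  | [] => n / 2
  | a :: r => if c == a then pairsRun c (n + 1) r else n / 2 + pairsRun a 1 r

lemma pairsCountB_replicate (c : Char) : ∀ n, pairsCountB (List.replicate n c) = n / 2 := by
  intro n
  induction n using Nat.twoStepInduction with
  | zero => rfl
  | one => rfl
  | more n ih _ =>
      show pairsCountB (c :: c :: List.replicate n c) = (n + 2) / 2
      rw [pairsCountB]
      simp only [BEq.rfl, if_pos, ih]
      omega

lemma pairsCountB_replicate_append (c d : Char) (hcd : (c == d) = false) (r : List Char) :
    ∀ n, pairsCountB (List.replicate n c ++ d :: r) = n / 2 + pairsCountB (d :: r) := by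
  intro n
  induction n using Nat.twoStepInduction with
  | zero => simp
  | one =>
      show pairsCountB (c :: d :: r) = 1 / 2 + pairsCountB (d :: r)
      rw [pairsCountB]
      simp [hcd]
  | more n ih _ =>
      show pairsCountB (c :: c :: (List.replicate n c ++ d :: r)) = (n + 2) / 2 + pairsCountB (d :: r)
      rw [pairsCountB]
      simp only [BEq.rfl, if_pos, ih]
      omega

lemma pairsRun_eq_pairsCountB : ∀ (cs : List Char) (c : Char) (n : Nat),
    pairsRun c n cs = pairsCountB (List.replicate n c ++ cs) := by
  intro cs
  induction cs with
  | nil => intro c n; simp [pairsRun, pairsCountB_replicate]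
  | cons a r ih =>
      intro c n
      rw [pairsRun]
      by_cases h : (c == a) = true
      · have hca : c = a := by exact eq_of_beq h
        rw [if_pos h, ih, hca]
        have : List.replicate n a ++ a :: r = List.replicate (n + 1) a ++ r := by
          rw [List.replicate_succ' (n := n)]
          simp
        rw [this]
      · have hf : (c == a) = false := by simpa using h
        rw [if_neg h, ih a 1, pairsCountB_replicate_append c a hf r n]
        simp

lemma sumHalves_concat (runs : List (Char × Nat)) (c : Char) (n : Nat) :
    sumHalves (runs ++ [(c, n)]) = sumHalves runs + n / 2 := by
  simp [sumHalves]

lemma foldRuns_sum : ∀ (cs : List Char) (runs : List (Char × Nat)) (c : Char) (n : Nat),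
    sumHalves (List.foldl pvStepRuns (runs ++ [(c, n)]) cs)
      = sumHalves runs + pairsRun c n cs := by
  intro cs
  induction cs with
  | nil => intro runs c n; simp [sumHalves_concat, pairsRun]
  | cons a r ih =>
      intro runs c n
      rw [List.foldl_cons]
      have hstep : pvStepRuns (runs ++ [(c, n)]) a =
          if c == a then runs ++ [(c, n + 1)] else (runs ++ [(c, n)]) ++ [(a, 1)] := by
        rw [pvStepRuns, List.getLast?_concat]
        by_cases h : (c == a) = true
        · simp [h]
        · simp [h]
      by_cases h : (c == a) = true
      · rw [hstep, if_pos h, ih, pairsRun, if_pos h]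
      · rw [hstep, if_neg h, ih, sumHalves_concat, pairsRun, if_neg h]
        omega

lemma alt_sum_eq_pairsCountB (cs : List Char) :
    sumHalves (List.foldl pvStepRuns [] cs) = pairsCountB cs := by
  cases cs with
  | nil => rfl
  | cons a r =>
      rw [List.foldl_cons]
      have h0 : pvStepRuns [] a = [] ++ [(a, 1)] := rfl
      rw [h0, foldRuns_sum r [] a 1, pairsRun_eq_pairsCountB]
      simp [sumHalves]

-- the loop body after the index lookup has been resolved: a step on adjacent pairs
def stepG (st : Bool × List String) (q : Char × Char) : Bool × List String :=
  if st.1 then (false, st.2)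
  else if q.1 == q.2 then (true, st.2 ++ [String.ofList [q.1, q.2]]) else st

-- the enumerated init of cs, with the successor lookup performed, is the adjacent-pair zip
lemma enum_proj_eq_zip (cs : List Char) :
    (PySem.List.enumerate cs.dropLast 0).map
      (fun p : Int × Char => (p.2, PySem.List.pyGet? cs (p.1 + 1)))
    = (cs.zip cs.tail).map (fun q : Char × Char => (q.1, some q.2)) := by
  apply List.ext_getElem?
  intro k
  rcases lt_or_ge k (cs.length - 1) with hk | hk
  · have hdl : k < cs.dropLast.length := by simp [List.length_dropLast]; omega
    have hzl : k < (cs.zip cs.tail).length := by simp [List.length_zip]; omega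
    have hk1 : k + 1 < cs.length := by omega
    rw [List.getElem?_map, List.getElem?_map]
    rw [List.getElem?_eq_getElem (by simpa [PySem.List.length_enumerate] using hdl),
        List.getElem?_eq_getElem hzl]
    have he := PySem.List.getElem_enumerate (xs := cs.dropLast) (s := 0) (k := k) (h := by
      simpa [PySem.List.length_enumerate] using hdl)
    rw [he]
    simp only [Option.map_some]
    have h1 : ((0 : Int) + (k : Int)) + 1 = (((k + 1 : Nat) : Int)) := by push_cast; ring
    rw [h1, PySem.List.pyGet?_natCast, List.getElem?_eq_getElem hk1]
    have hzip : (cs.zip cs.tail)[k] = (cs[k]'(by omega), cs.tail[k]'(by simp [List.length_tail]; omega)) := by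
      simp [List.getElem_zip]
    have htail : cs.tail[k]'(by simp [List.length_tail]; omega) = cs[k+1]'hk1 := by
      simp [List.getElem_tail]
    simp [List.getElem_dropLast, hzip, htail]
  · have h1 : (PySem.List.enumerate cs.dropLast 0).length ≤ k := by
      simp [PySem.List.length_enumerate, List.length_dropLast]; omega
    have h2 : (cs.zip cs.tail).length ≤ k := by
      simp [List.length_zip, List.length_tail]; omega
    rw [List.getElem?_map, List.getElem?_map,
        List.getElem?_eq_none h1, List.getElem?_eq_none h2]
    rfl

-- fold the skip-flag loop over adjacent pairs: result list length counts greedy pairs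
lemma foldG_count : ∀ (cs : List Char) (acc : List String),
    (List.foldl stepG (false, acc) (cs.zip cs.tail)).2.length = acc.length + pairsCountB cs := by
  intro cs
  induction cs using pairsCountB.induct with
  | case1 => intro acc; simp [pairsCountB]
  | case2 a => intro acc; simp [pairsCountB]
  | case3 a b r hab ih =>
      intro acc
      simp only [List.zip_cons_cons, List.tail_cons, List.foldl_cons]
      rw [show stepG (false, acc) (a, b) = (true, acc ++ [String.ofList [a, b]]) by
        simp [stepG, hab]]
      cases r with
      | nil => simp [pairsCountB, hab]
      | cons c r' =>
          simp only [List.tail_cons] at ih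
          simp only [List.zip_cons_cons, List.foldl_cons]
          rw [show stepG (true, acc ++ [String.ofList [a, b]]) (b, c)
                = (false, acc ++ [String.ofList [a, b]]) by simp [stepG]]
          rw [ih]
          simp [pairsCountB, hab]
          omega
  | case4 a b r hab ih =>
      intro acc
      simp only [List.zip_cons_cons, List.tail_cons, List.foldl_cons]
      rw [show stepG (false, acc) (a, b) = (false, acc) by simp [stepG, hab]]
      simp only [List.tail_cons] at ih
      rw [ih]
      simp [pairsCountB, hab]

-- the A-side loop, with the always-successful lookup resolved, is the stepG fold over the zip
lemma foldA_eq_foldG (cs : List Char) :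
      (PySem.List.enumerate cs.dropLast 0).foldl
        (fun (st : Bool × List String) (p : Int × Char) =>
          if st.1 then (false, st.2)
          else
            match PySem.List.pyGet? cs (p.1 + 1) with
            | some nxt => if p.2 == nxt then (true, st.2 ++ [String.ofList [p.2, nxt]]) else st
            | none => st) (false, ([] : List String))
      = List.foldl stepG (false, ([] : List String)) (cs.zip cs.tail) := by
  have h1 := List.foldl_map
      (f := fun p : Int × Char => (p.2, PySem.List.pyGet? cs (p.1 + 1)))
      (g := fun (st : Bool × List String) (q : Char × Option Char) =>
        if st.1 then (false, st.2)
        else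
          match q.2 with
          | some nxt => if q.1 == nxt then (true, st.2 ++ [String.ofList [q.1, nxt]]) else st
          | none => st)
      (l := PySem.List.enumerate cs.dropLast 0)
      (init := (false, ([] : List String)))
  have h2 := List.foldl_map
      (f := fun q : Char × Char => (q.1, some q.2))
      (g := fun (st : Bool × List String) (q : Char × Option Char) =>
        if st.1 then (false, st.2)
        else
          match q.2 with
          | some nxt => if q.1 == nxt then (true, st.2 ++ [String.ofList [q.1, nxt]]) else st
          | none => st)
      (l := cs.zip cs.tail)
      (init := (false, ([] : List String)))
  rw [← h1, enum_proj_eq_zip, h2]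
  rfl

-- ===== VERDICT (by name: the statement is the Claim_ definition above) =====
theorem password_rule_three_spec : Claim_equal_password_rule_three := by
  intro s _
  show password_rule_three s = password_rule_three_alt s
  simp only [password_rule_three, password_rule_three_alt]
  rw [PySem.List.slice_to_neg_one, foldA_eq_foldG, foldG_count]
  have := alt_sum_eq_pairsCountB s.toList
  rw [sumHalves] at this
  rw [this]
  simp
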